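-- pv_equiv track=rewrite | github.com/pypi-data/pypi-mirror-9 | packages/awlsim/awlsim-0.39.tar.gz/awlsim-0.39/awlsim/core/cpu.py | __dumpMem
-- ===== SOURCE A (Python) =====
-- def __dumpMem(prefix, memArray, maxLen):
-- 	if not memArray:
-- 		return prefix + "--"
-- 	ret, line, first, count, i = [], [], True, 0, 0
-- 	while i < maxLen:
-- 		line.append("%02X" % memArray[i])
-- 		count += 1
-- 		if count >= 16:
-- 			if not first:
-- 				prefix = ' ' * len(prefix)
-- 			first = False
-- 			ret.append(prefix + ' '.join(line))
-- 			line, count = [], 0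
-- 		i += 1
-- 	assert(count == 0)
-- 	return '\n'.join(ret)
-- ===== SOURCE B (Python) =====
-- def __dumpMem(prefix, memArray, maxLen):
-- 	if not memArray:
-- 		return prefix + "--"
-- 	pad = ' ' * len(prefix)
-- 	lines = []
-- 	for start in range(0, maxLen, 16):
-- 		chunk = ' '.join('%02X' % memArray[start + j] for j in range(16))
-- 		lines.append((prefix if not lines else pad) + chunk)
-- 	return '\n'.join(lines)
-- ===== Notes on version B (the rewrite author's own statement) =====
-- stated objective: simpler
-- what changed: Replaces A's single index loop with its line/count/first mutable bookkeeping by a direct iteration over 16-byte chunk starts, building each output line with one join expression.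
import Mathlib
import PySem

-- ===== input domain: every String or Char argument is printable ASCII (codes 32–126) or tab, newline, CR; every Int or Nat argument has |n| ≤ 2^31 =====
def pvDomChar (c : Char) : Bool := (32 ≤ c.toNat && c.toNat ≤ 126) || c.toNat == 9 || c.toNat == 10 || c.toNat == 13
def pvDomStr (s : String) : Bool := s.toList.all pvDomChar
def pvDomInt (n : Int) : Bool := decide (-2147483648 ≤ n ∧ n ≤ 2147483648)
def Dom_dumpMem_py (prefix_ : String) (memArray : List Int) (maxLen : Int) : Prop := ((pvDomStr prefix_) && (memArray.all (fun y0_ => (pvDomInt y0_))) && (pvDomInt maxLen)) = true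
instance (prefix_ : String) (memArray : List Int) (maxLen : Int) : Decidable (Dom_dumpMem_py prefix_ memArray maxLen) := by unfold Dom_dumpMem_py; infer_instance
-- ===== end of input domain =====

-- B replaces A's single index loop with byte counter / first-line flag by a direct iteration
-- over 16-byte chunk starts, building each line in one join (simpler decomposition, same cost).

-- one uppercase hex digit (exact for 0 ≤ n < 16)
def pvHexDigit (n : Nat) : Char := if n < 10 then Char.ofNat (48 + n) else Char.ofNat (55 + n)

-- uppercase hex digits of a Nat, most significant first (exact port of '%X' on a nonnegative value)
def pvHexChars (n : Nat) : List Char :=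
  if _h : n < 16 then [pvHexDigit n]
  else pvHexChars (n / 16) ++ [pvHexDigit (n % 16)]
  decreasing_by exact Nat.div_lt_self (by omega) (by omega)

-- exact port of Python's "%02X" % v (hand-written: PySem has no %-formatting;
-- for v < 0 CPython prints '-' then the hex digits of -v, zero-padding to total width 2)
def pvFmt02X (v : Int) : String :=
  if v < 0 then String.ofList ('-' :: pvHexChars (-v).toNat)
  else if v < 16 then String.ofList ('0' :: pvHexChars v.toNat)
  else String.ofList (pvHexChars v.toNat)

-- ' ' * len(s)
def pvSpaces (s : String) : String := String.ofList (List.replicate s.toList.length ' ')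

-- ===== PORT A =====
-- A's while loop (state: ret, line, first, count, i); the trailing 'assert count == 0'
-- raises outside Pre_, so it is not modelled.
def dumpLoopA (mem : List Int) (maxLen : Int) (pfx : String) (ret line : List String)
    (first : Bool) (count i : Int) : String :=
  if _h : i < maxLen then
    let line' := line ++ [pvFmt02X (PySem.List.pyGetD mem i 0)]
    let count' := count + 1
    if count' ≥ 16 then
      let pfx' := if first then pfx else pvSpaces pfx
      dumpLoopA mem maxLen pfx' (ret ++ [pfx' ++ PySem.Str.join " " line']) [] false 0 (i + 1)
    else
      dumpLoopA mem maxLen pfx ret line' first count' (i + 1)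
  else PySem.Str.join "\n" ret
  termination_by (maxLen - i).toNat
  decreasing_by all_goals (simp_wf; omega)

def dumpMem_py (prefix_ : String) (memArray : List Int) (maxLen : Int) : String :=
  if memArray = [] then prefix_ ++ "--"
  else dumpLoopA memArray maxLen prefix_ [] [] true 0 0

-- ===== PORT B =====
-- ' '.join('%02X' % memArray[start + j] for j in range(16))
def chunkB (mem : List Int) (start : Int) : String :=
  PySem.Str.join " " ((List.range 16).map (fun (j : Nat) => pvFmt02X (PySem.List.pyGetD mem (start + (j : Int)) 0)))

def dumpMem_py_alt (prefix_ : String) (memArray : List Int) (maxLen : Int) : String :=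
  if memArray = [] then prefix_ ++ "--"
  else
    PySem.Str.join "\n" ((PySem.List.pyRange 0 maxLen 16).foldl
      (fun acc start => acc ++ [(if acc = [] then prefix_ else pvSpaces prefix_) ++ chunkB memArray start]) [])

-- ===== PRECONDITION & SPEC =====
-- Exactly the inputs on which A returns: on a nonempty array with maxLen > 0, A raises
-- IndexError when maxLen > len(memArray) and AssertionError when maxLen is not a multiple of 16.
def Pre_dumpMem_py (prefix_ : String) (memArray : List Int) (maxLen : Int) : Prop :=
  memArray = [] ∨ maxLen ≤ 0 ∨ (PySem.Int.mod maxLen 16 = 0 ∧ maxLen ≤ memArray.length)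
instance (prefix_ : String) (memArray : List Int) (maxLen : Int) : Decidable (Pre_dumpMem_py prefix_ memArray maxLen) := by unfold Pre_dumpMem_py; infer_instance

def pvWitness_dumpMem_py : String × List Int × Int :=
  ("DB 1: ", [0, 1, 2, 3, 250, 251, 252, 253, 254, 255, 10, 11, 12, 13, 14, 15, 16], 16)

def Spec_dumpMem_py (prefix_ : String) (memArray : List Int) (maxLen : Int) (out : String) : Prop := out = dumpMem_py_alt prefix_ memArray maxLen
instance (prefix_ : String) (memArray : List Int) (maxLen : Int) (out : String) : Decidable (Spec_dumpMem_py prefix_ memArray maxLen out) := by unfold Spec_dumpMem_py; infer_instance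

-- ===== CLAIM (what is proved, stated in full; the proofs are below) =====
def Claim_equal_dumpMem_py : Prop := ∀ (prefix_ : String) (memArray : List Int) (maxLen : Int), Dom_dumpMem_py prefix_ memArray maxLen → Pre_dumpMem_py prefix_ memArray maxLen → Spec_dumpMem_py prefix_ memArray maxLen (dumpMem_py prefix_ memArray maxLen)

-- ===== LEMMAS AND PROOFS =====

-- the n hex bytes starting at index i, as strings
def chunkStrs (mem : List Int) (i : Int) (n : Nat) : List String :=
  (List.range n).map (fun (j : Nat) => pvFmt02X (PySem.List.pyGetD mem (i + (j : Int)) 0))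

-- the chunk start indices i, i+16, …, i+16*(k-1)
def startsList (k : Nat) (i : Int) : List Int := (List.range k).map (fun (j : Nat) => i + 16 * (j : Int))

theorem chunkStrs_succ (mem : List Int) (i : Int) (m : Nat) :
    chunkStrs mem i (m + 1) = pvFmt02X (PySem.List.pyGetD mem i 0) :: chunkStrs mem (i + 1) m := by
  unfold chunkStrs
  rw [List.range_succ_eq_map]
  simp only [List.map_cons, List.map_map, Nat.cast_zero, add_zero, List.cons.injEq]
  refine ⟨trivial, ?_⟩
  apply List.map_congr_left
  intro j _
  simp only [Function.comp_apply]
  have : i + ((j : Int) + 1) = i + 1 + (j : Int) := by ring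
  push_cast
  rw [this]

theorem startsList_succ (m : Nat) (i : Int) :
    startsList (m + 1) i = i :: startsList m (i + 16) := by
  unfold startsList
  rw [List.range_succ_eq_map]
  simp only [List.map_cons, List.map_map, Nat.cast_zero, mul_zero, add_zero, List.cons.injEq]
  refine ⟨trivial, ?_⟩
  apply List.map_congr_left
  intro j _
  simp only [Function.comp_apply]
  push_cast
  ring

theorem chunkB_eq (mem : List Int) (s : Int) :
    chunkB mem s = PySem.Str.join " " (chunkStrs mem s 16) := rfl

theorem pvSpaces_spaces (s : String) : pvSpaces (pvSpaces s) = pvSpaces s := by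
  simp [pvSpaces]

theorem pyRange16 (a : Int) (k : Nat) :
    PySem.List.pyRange a (a + 16 * k) 16 = startsList k a := by
  rw [PySem.List.pyRange_of_pos _ _ (by norm_num)]
  have hcnt : (if a < a + 16 * (k : Int) then ((a + 16 * (k : Int) - a + 16 - 1) / 16).toNat else 0) = k := by
    split <;> omega
  rw [hcnt]
  unfold startsList
  rfl

-- A's inner 16 iterations build one chunk line and append it
theorem innerA (mem : List Int) (maxLen : Int) :
    ∀ (n : Nat), 0 < n → ∀ (pfx : String) (ret line : List String) (first : Bool) (count i : Int),
    count + n = 16 → i + n ≤ maxLen →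
    dumpLoopA mem maxLen pfx ret line first count i =
      dumpLoopA mem maxLen (if first then pfx else pvSpaces pfx)
        (ret ++ [(if first then pfx else pvSpaces pfx) ++
          PySem.Str.join " " (line ++ chunkStrs mem i n)])
        [] false 0 (i + n) := by
  intro n
  induction n with
  | zero => omega
  | succ m ih =>
    intro _ pfx ret line first count i hc hi
    rw [dumpLoopA, dif_pos (by push_cast at hi; omega)]
    rcases Nat.eq_zero_or_pos m with hm | hm
    · subst hm
      rw [if_pos (by push_cast at hc; omega)]
      simp [chunkStrs]
    · rw [if_neg (by push_cast at hc ⊢; omega)]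
      rw [ih hm pfx ret _ first (count + 1) (i + 1) (by push_cast at hc ⊢; omega) (by push_cast at hi ⊢; omega)]
      rw [chunkStrs_succ]
      have hi' : i + 1 + (m : Int) = i + ((m + 1 : Nat) : Int) := by push_cast; ring
      rw [hi']
      congr 2
      simp

-- A's loop equals B's chunk fold, given the invariant linking (first, pfx) to the accumulator
theorem outerA (mem : List Int) (pfx0 : String) :
    ∀ (k : Nat) (i : Int) (acc : List String) (pfx : String) (first : Bool),
    (first = true → acc = [] ∧ pfx = pfx0) →
    (first = false → acc ≠ [] ∧ pvSpaces pfx = pvSpaces pfx0) →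
    dumpLoopA mem (i + 16 * k) pfx acc [] first 0 i =
      PySem.Str.join "\n" ((startsList k i).foldl
        (fun a s => a ++ [(if a = [] then pfx0 else pvSpaces pfx0) ++ chunkB mem s]) acc) := by
  intro k
  induction k with
  | zero =>
    intro i acc pfx first _ _
    rw [dumpLoopA, dif_neg (by omega)]
    simp [startsList]
  | succ m ih =>
    intro i acc pfx first h1 h2
    rw [innerA mem _ 16 (by omega) pfx acc [] first 0 i (by omega) (by push_cast; omega)]
    rw [startsList_succ, List.foldl_cons]
    have hsel : (if first then pfx else pvSpaces pfx) = (if acc = [] then pfx0 else pvSpaces pfx0) := by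
      cases first with
      | true =>
        obtain ⟨ha, hp⟩ := h1 rfl
        simp [ha, hp]
      | false =>
        obtain ⟨ha, hp⟩ := h2 rfl
        simp [ha, hp]
    have hline : PySem.Str.join " " ([] ++ chunkStrs mem i 16) = chunkB mem i := by
      rw [chunkB_eq, List.nil_append]
    rw [hline, hsel]
    have hcast : i + (16 : Int) * ((m + 1 : Nat) : Int) = (i + 16) + 16 * (m : Int) := by push_cast; ring
    rw [show i + ((16 : Nat) : Int) = i + 16 from by norm_num]
    rw [hcast]
    exact ih (i + 16) (acc ++ [(if acc = [] then pfx0 else pvSpaces pfx0) ++ chunkB mem i])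
        (if acc = [] then pfx0 else pvSpaces pfx0) false (by simp)
        (by
          intro _
          refine ⟨by simp, ?_⟩
          split
          · rfl
          · exact pvSpaces_spaces pfx0)

-- ===== VERDICT (by name: the statement is the Claim_ definition above) =====
theorem dumpMem_py_spec : Claim_equal_dumpMem_py := by
  intro prefix_ memArray maxLen _hdom hpre
  unfold Spec_dumpMem_py dumpMem_py dumpMem_py_alt
  by_cases hmem : memArray = []
  · simp [hmem]
  · rw [if_neg hmem, if_neg hmem]
    have hempty : maxLen ≤ 0 →
        dumpLoopA memArray maxLen prefix_ [] [] true 0 0 =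
          PySem.Str.join "\n" ((PySem.List.pyRange 0 maxLen 16).foldl
            (fun acc start => acc ++ [(if acc = [] then prefix_ else pvSpaces prefix_) ++ chunkB memArray start]) []) := by
      intro hml
      rw [dumpLoopA, dif_neg (by omega)]
      rw [PySem.List.pyRange_of_pos _ _ (by norm_num), if_neg (by omega)]
      simp
    rcases hpre with h | h | h
    · exact absurd h hmem
    · exact hempty h
    · obtain ⟨hmod, _hlen⟩ := h
      by_cases hml : maxLen ≤ 0
      · exact hempty hml
      · have hdvd : (16 : Int) ∣ maxLen := (PySem.Int.mod_eq_zero_iff_dvd maxLen 16).mp hmod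
        obtain ⟨c, hc⟩ := hdvd
        have hk : maxLen = (0 : Int) + 16 * ((c.toNat : Nat) : Int) := by omega
        rw [hk, pyRange16 0 c.toNat]
        exact outerA memArray prefix_ c.toNat 0 [] prefix_ true (fun _ => ⟨rfl, rfl⟩) (by simp)
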